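-- pv_equiv track=rewrite | github.com/neel747/wht_hybrid_attack | cascade_wht_attack.py | find_parity_checks
-- ===== SOURCE A (Python) =====
-- from typing import List, Tuple, Optional
--
-- def _poly_multiply_gf2(poly1: set, poly2: set) -> set:
--     """Multiply two polynomials over GF(2), represented as sets of exponents."""
--     result = set()
--     for a in poly1:
--         for b in poly2:
--             term = a + b
--             if term in result:
--                 result.remove(term)  # XOR cancellation
--             else:
--                 result.add(term)
--     return result
--
-- def find_parity_checks(length: int, taps: List[int], N: int,
--                        max_weight: int = 5) -> List[List[int]]:
--     """
--     Find low-weight parity-check equations from the LFSR feedback polynomial.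
--
--     The LFSR recurrence gives: z_{t+L} = z_{t+tap0} XOR z_{t+tap1} XOR ...
--     => parity check: z_{t+tap0} XOR z_{t+tap1} XOR ... XOR z_{t+L} = 0
--
--     We also multiply the feedback polynomial by (1 + x^d) for various d
--     to find additional low-weight parity checks (polynomial multiples).
--
--     Returns: list of offset lists [[d0, d1, ..., dk], ...]
--              Each means z_{t+d0} XOR z_{t+d1} XOR ... XOR z_{t+dk} = 0
--     """
--     # Feedback polynomial: x^L + x^{tap0} + x^{tap1} + ...
--     poly = set(taps) | {length}
--
--     all_checks = []
--     seen = set()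
--
--     # Fundamental check
--     fund = sorted(poly)
--     all_checks.append(fund)
--     seen.add(tuple(fund))
--
--     # Low-weight multiples via (1 + x^d)
--     for d in range(1, N):
--         multiplier = {0, d}
--         product = _poly_multiply_gf2(poly, multiplier)
--         if len(product) <= max_weight and len(product) > 0:
--             offsets = sorted(product)
--             min_o = offsets[0]
--             offsets = [o - min_o for o in offsets]
--             if max(offsets) < N:
--                 key = tuple(offsets)
--                 if key not in seen:
--                     seen.add(key)
--                     all_checks.append(offsets)
--
--     # Low-weight multiples via (1 + x^a + x^b)
--     for a in range(1, min(N // 2, 40)):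
--         for b in range(a + 1, min(N // 2, 40)):
--             multiplier = {0, a, b}
--             product = _poly_multiply_gf2(poly, multiplier)
--             if len(product) <= max_weight and len(product) > 0:
--                 offsets = sorted(product)
--                 min_o = offsets[0]
--                 offsets = [o - min_o for o in offsets]
--                 if max(offsets) < N:
--                     key = tuple(offsets)
--                     if key not in seen:
--                         seen.add(key)
--                         all_checks.append(offsets)
--
--     return all_checks
-- ===== SOURCE B (Python) =====
-- from typing import List
--
-- def _uniq(xs: List[int]) -> List[int]:
--     """Distinct values of a sorted list, in order (skip adjacent repeats)."""
--     out = []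
--     for x in xs:
--         if out and out[-1] == x:
--             continue
--         out.append(x)
--     return out
--
-- def _odd_runs(xs: List[int]) -> List[int]:
--     """Values occurring an odd number of times in a sorted list, in order.
--
--     One pass: a repeat of the last kept value cancels it (GF(2)), anything
--     else is kept; adjacency of equal values makes this the run-parity scan."""
--     out = []
--     for x in xs:
--         if out and out[-1] == x:
--             out.pop()
--         else:
--             out.append(x)
--     return out
--
-- def find_parity_checks(length: int, taps: List[int], N: int,
--                        max_weight: int = 5) -> List[List[int]]:
--     # Feedback polynomial as a strictly increasing exponent list.
--     P = _uniq(sorted(taps + [length]))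
--
--     all_checks = [P]
--     seen = {tuple(P)}
--
--     def consider(shifts) -> None:
--         # GF(2) product of P with sum of x^s: sort the shifted copies,
--         # keep exponents appearing an odd number of times.
--         prod = _odd_runs(sorted(x + s for x in P for s in shifts))
--         if prod and len(prod) <= max_weight:
--             base = prod[0]
--             offs = [x - base for x in prod]
--             if max(offs) < N:
--                 key = tuple(offs)
--                 if key not in seen:
--                     seen.add(key)
--                     all_checks.append(offs)
--
--     for d in range(1, N):
--         consider([0, d])
--
--     lim = min(N // 2, 40)
--     for a in range(1, lim):
--         for b in range(a + 1, lim):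
--             consider([0, a, b])
--
--     return all_checks
-- ===== Notes on version B (the rewrite author's own statement) =====
-- stated objective: alternative
-- what changed: GF(2) polynomial products are computed by sorting the shifted exponent copies and keeping odd-multiplicity runs (sort-then-parity-scan over sorted lists, yielding the sorted product directly) instead of XOR-toggling a hash set of exponents and sorting at the end; the feedback polynomial is built by sort plus adjacent-run dedup instead of a set union.
import Mathlib
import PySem

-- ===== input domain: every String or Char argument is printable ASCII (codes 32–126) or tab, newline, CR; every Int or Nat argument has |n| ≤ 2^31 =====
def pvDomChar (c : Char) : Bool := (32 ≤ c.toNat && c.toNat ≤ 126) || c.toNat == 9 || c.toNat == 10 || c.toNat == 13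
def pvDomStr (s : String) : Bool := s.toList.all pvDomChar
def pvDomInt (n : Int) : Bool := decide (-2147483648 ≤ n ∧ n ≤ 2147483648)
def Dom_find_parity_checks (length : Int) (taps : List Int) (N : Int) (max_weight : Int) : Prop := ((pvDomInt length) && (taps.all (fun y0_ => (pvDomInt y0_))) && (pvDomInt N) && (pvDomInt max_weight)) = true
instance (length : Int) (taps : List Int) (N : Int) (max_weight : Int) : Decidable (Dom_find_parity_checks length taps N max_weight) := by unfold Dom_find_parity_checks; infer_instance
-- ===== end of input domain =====

-- B computes GF(2) polynomial products by sorting shifted exponent copies and keeping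
-- odd-multiplicity runs (sort-then-scan) instead of A's hash-set XOR toggling; same results.


-- ===== PORT A =====

-- body of A's inner loop: `term in result` test, then set.remove / set.add;
-- under the membership guard Python's set.remove equals Set.discard (PySem.Set.remove?_of_mem)
def pvToggle (r : PySem.Set Int) (t : Int) : PySem.Set Int :=
  if PySem.Set.contains r t then PySem.Set.discard r t else PySem.Set.add r t

def poly_multiply_gf2 (p1 p2 : PySem.Set Int) : PySem.Set Int :=
  p1.foldl (fun res a => p2.foldl (fun r b => pvToggle r (a + b)) res) PySem.Set.empty

-- the block A repeats verbatim in both of its loops (product, weight test, normalise, dedup)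
def pvStepA (N max_weight : Int) (poly : PySem.Set Int)
    (st : List (List Int) × PySem.Set (List Int)) (mult : PySem.Set Int) :
    List (List Int) × PySem.Set (List Int) :=
  let product := poly_multiply_gf2 poly mult
  if PySem.Set.len product ≤ max_weight ∧ 0 < PySem.Set.len product then
    let offsets := PySem.List.sorted product (fun x => x)
    match PySem.List.pyGet? offsets 0 with
    | none => st
    | some min_o =>
      let offsets := offsets.map (fun o => o - min_o)
      match PySem.List.max? offsets (fun x => x) with
      | none => st
      | some mx =>
        if mx < N then
          if PySem.Set.contains st.2 offsets then st
          else (st.1 ++ [offsets], PySem.Set.add st.2 offsets)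
        else st
  else st

def find_parity_checks (length : Int) (taps : List Int) (N : Int) (max_weight : Int) : List (List Int) :=
  let poly : PySem.Set Int := PySem.Set.union (PySem.Set.ofList taps) [length]
  let fund := PySem.List.sorted poly (fun x => x)
  let st0 : List (List Int) × PySem.Set (List Int) :=
    ([fund], PySem.Set.add PySem.Set.empty fund)
  let st1 := (PySem.List.pyRange 1 N).foldl
      (fun st d => pvStepA N max_weight poly st (PySem.Set.ofList [0, d])) st0
  let st2 := (PySem.List.pyRange 1 (min (PySem.Int.floordiv N 2) 40)).foldl
      (fun st a => (PySem.List.pyRange (a + 1) (min (PySem.Int.floordiv N 2) 40)).foldl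
        (fun st b => pvStepA N max_weight poly st (PySem.Set.ofList [0, a, b])) st) st1
  st2.1

-- ===== PORT B =====

-- distinct values of a sorted list, in order: one pass skipping adjacent repeats
def pvUniqStep (out : List Int) (x : Int) : List Int :=
  if out.getLast? = some x then out else out ++ [x]

def pvUniq (xs : List Int) : List Int := xs.foldl pvUniqStep []

-- values occurring an odd number of times in a sorted list, in order:
-- a repeat of the last kept value cancels it (out.pop()), anything else is appended
def pvOddStep (out : List Int) (x : Int) : List Int :=
  if out.getLast? = some x then out.dropLast else out ++ [x]

def pvOddRuns (xs : List Int) : List Int := xs.foldl pvOddStep []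

-- B's `consider(shifts)` helper
def pvConsider (N max_weight : Int) (P : List Int)
    (st : List (List Int) × PySem.Set (List Int)) (shifts : List Int) :
    List (List Int) × PySem.Set (List Int) :=
  let prod := pvOddRuns (PySem.List.sorted (P.flatMap (fun x => shifts.map (fun s => x + s))) (fun x => x))
  if prod ≠ [] ∧ (prod.length : Int) ≤ max_weight then
    match PySem.List.pyGet? prod 0 with
    | none => st
    | some base =>
      let offs := prod.map (fun x => x - base)
      match PySem.List.max? offs (fun x => x) with
      | none => st
      | some mx =>
        if mx < N then
          if PySem.Set.contains st.2 offs then st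
          else (st.1 ++ [offs], PySem.Set.add st.2 offs)
        else st
  else st

def find_parity_checks_alt (length : Int) (taps : List Int) (N : Int) (max_weight : Int) : List (List Int) :=
  let P := pvUniq (PySem.List.sorted (taps ++ [length]) (fun x => x))
  let st0 : List (List Int) × PySem.Set (List Int) :=
    ([P], PySem.Set.add PySem.Set.empty P)
  let st1 := (PySem.List.pyRange 1 N).foldl
      (fun st d => pvConsider N max_weight P st [0, d]) st0
  let lim := min (PySem.Int.floordiv N 2) 40
  ((PySem.List.pyRange 1 lim).foldl
      (fun st a => (PySem.List.pyRange (a + 1) lim).foldl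
        (fun st b => pvConsider N max_weight P st [0, a, b]) st) st1).1

-- ===== PRECONDITION & SPEC =====
def Spec_find_parity_checks (length : Int) (taps : List Int) (N : Int) (max_weight : Int) (out : List (List Int)) : Prop := out = find_parity_checks_alt length taps N max_weight
instance (length : Int) (taps : List Int) (N : Int) (max_weight : Int) (out : List (List Int)) : Decidable (Spec_find_parity_checks length taps N max_weight out) := by unfold Spec_find_parity_checks; infer_instance

-- ===== CLAIM (what is proved, stated in full; the proofs are below) =====
def Claim_equal_find_parity_checks : Prop := ∀ (length : Int) (taps : List Int) (N : Int) (max_weight : Int), Dom_find_parity_checks length taps N max_weight → Spec_find_parity_checks length taps N max_weight (find_parity_checks length taps N max_weight)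

-- ===== LEMMAS AND PROOFS =====

theorem mem_pvToggle (r : PySem.Set Int) (t y : Int) :
    y ∈ pvToggle r t ↔ (if y = t then t ∉ r else y ∈ r) := by
  unfold pvToggle
  by_cases hm : t ∈ r
  · rw [if_pos ((PySem.Set.contains_iff r t).mpr hm)]
    by_cases hy : y = t
    · subst hy; simp [PySem.Set.mem_discard, hm]
    · simp [PySem.Set.mem_discard, hy]
  · rw [if_neg (by simp [hm])]
    by_cases hy : y = t
    · subst hy; simp [hm]
    · simp [hy, hm]

theorem nodup_pvToggle {r : PySem.Set Int} (h : r.Nodup) (t : Int) : (pvToggle r t).Nodup := by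
  unfold pvToggle
  split
  · exact PySem.Set.nodup_discard r t h
  · exact PySem.Set.nodup_add r t h

theorem mem_foldl_pvToggle (L : List Int) :
    ∀ (r : PySem.Set Int), r.Nodup → ∀ y,
      (y ∈ L.foldl pvToggle r ↔ (if y ∈ r then L.count y % 2 = 0 else L.count y % 2 = 1)) := by
  induction L with
  | nil => intro r _ y; simp
  | cons x L ih =>
    intro r hr y
    simp only [List.foldl_cons]
    rw [ih _ (nodup_pvToggle hr x) y]
    have ht := mem_pvToggle r x y
    by_cases hyx : y = x
    · subst hyx
      have hc : (y :: L).count y = L.count y + 1 := by simp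
      by_cases hm : y ∈ r
      · have h1 : y ∉ pvToggle r y := by rw [ht]; simp [hm]
        rw [if_neg h1, if_pos hm, hc]; omega
      · have h1 : y ∈ pvToggle r y := by rw [ht]; simp [hm]
        rw [if_pos h1, if_neg hm, hc]; omega
    · have hxy : (x == y) = false := by
        simp only [beq_eq_false_iff_ne, ne_eq]
        exact fun h => hyx h.symm
      have hc : (x :: L).count y = L.count y := by
        rw [List.count_cons, hxy]; simp
      by_cases hm : y ∈ r
      · have h1 : y ∈ pvToggle r x := by rw [ht, if_neg hyx]; exact hm
        rw [if_pos h1, if_pos hm, hc]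
      · have h1 : y ∉ pvToggle r x := by rw [ht, if_neg hyx]; exact hm
        rw [if_neg h1, if_neg hm, hc]

theorem nodup_foldl_pvToggle (L : List Int) :
    ∀ {r : PySem.Set Int}, r.Nodup → (L.foldl pvToggle r).Nodup := by
  induction L with
  | nil => intro r h; simpa using h
  | cons x L ih =>
    intro r hr
    simpa only [List.foldl_cons] using ih (nodup_pvToggle hr x)

theorem pmul_flat (p1 p2 : List Int) :
    poly_multiply_gf2 p1 p2
      = (p1.flatMap (fun a => p2.map (fun b => a + b))).foldl pvToggle PySem.Set.empty := by
  unfold poly_multiply_gf2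
  rw [List.foldl_flatMap]
  exact PySem.List.foldl_congr_mem _ _ _ _ (fun acc a _ => by rw [List.foldl_map])

theorem mem_pmul (p1 p2 : List Int) (y : Int) :
    y ∈ poly_multiply_gf2 p1 p2
      ↔ (p1.flatMap (fun a => p2.map (fun b => a + b))).count y % 2 = 1 := by
  rw [pmul_flat]
  rw [mem_foldl_pvToggle _ _ (by simp [PySem.Set.empty]) y]
  simp [PySem.Set.empty]

theorem nodup_pmul (p1 p2 : List Int) : (poly_multiply_gf2 p1 p2).Nodup := by
  rw [pmul_flat]
  exact nodup_foldl_pvToggle _ (by simp [PySem.Set.empty])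

-- in a ≤-sorted list every element is bounded by the last one
theorem pv_getLast?_le (l : List Int) (h : l.Pairwise (· ≤ ·)) :
    ∀ y ∈ l, ∃ z, l.getLast? = some z ∧ y ≤ z := by
  induction l with
  | nil => intro y hy; exact absurd hy (List.not_mem_nil)
  | cons a t ih =>
    intro y hy
    cases t with
    | nil =>
      rcases List.mem_cons.mp hy with hy | hy
      · exact ⟨a, rfl, le_of_eq hy⟩
      · exact absurd hy (List.not_mem_nil)
    | cons b t' =>
      have hbt : (b :: t').Pairwise (· ≤ ·) := (List.pairwise_cons.mp h).2
      rcases List.mem_cons.mp hy with hy | hy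
      · obtain ⟨z, hz1, hz2⟩ := ih hbt b List.mem_cons_self
        refine ⟨z, hz1, ?_⟩
        rw [hy]
        exact le_trans ((List.pairwise_cons.mp h).1 b List.mem_cons_self) hz2
      · exact ih hbt y hy

-- the one-pass parity scan: invariant over the fold
theorem pvOdd_fold (xs : List Int) :
    ∀ out : List Int, out.Pairwise (· < ·) → xs.Pairwise (· ≤ ·) →
      (∀ o ∈ out, ∀ z ∈ xs, o ≤ z) →
      ((xs.foldl pvOddStep out).Pairwise (· < ·) ∧
        ∀ y, y ∈ xs.foldl pvOddStep out ↔ (out ++ xs).count y % 2 = 1) := by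
  induction xs with
  | nil =>
    intro out hout _ _
    refine ⟨hout, fun y => ?_⟩
    simp only [List.foldl_nil, List.append_nil]
    constructor
    · intro hy
      have h1 : 0 < out.count y := List.count_pos_iff.mpr hy
      have h2 : out.count y ≤ 1 := List.nodup_iff_count_le_one.mp (hout.imp ne_of_lt) y
      omega
    · intro hy
      exact List.count_pos_iff.mp (by omega)
  | cons x xs' ih =>
    intro out hout hxs hle
    have hxs' : xs'.Pairwise (· ≤ ·) := (List.pairwise_cons.mp hxs).2
    have hxle : ∀ z ∈ xs', x ≤ z := (List.pairwise_cons.mp hxs).1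
    simp only [List.foldl_cons]
    by_cases hc : out.getLast? = some x
    · -- pop: out ends in x, the pair cancels
      rw [pvOddStep, if_pos hc]
      have hne : out ≠ [] := by intro h0; rw [h0] at hc; simp at hc
      have hx' : out.getLast hne = x := by
        have := List.getLast?_eq_some_getLast hne
        rw [hc] at this; exact (Option.some_inj.mp this).symm
      have hsplit : out.dropLast ++ [x] = out := by
        conv_rhs => rw [← List.dropLast_concat_getLast hne]
        rw [hx']
      have hout' : out.dropLast.Pairwise (· < ·) :=
        List.Pairwise.sublist (List.dropLast_sublist out) hout
      have hle' : ∀ o ∈ out.dropLast, ∀ z ∈ xs', o ≤ z := fun o ho z hz =>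
        hle o ((List.dropLast_sublist out).subset ho) z (List.mem_cons_of_mem _ hz)
      obtain ⟨hpw, hmem⟩ := ih out.dropLast hout' hxs' hle'
      refine ⟨hpw, fun y => ?_⟩
      rw [hmem y]
      have hcount : (out ++ x :: xs').count y = (out.dropLast ++ xs').count y + 2 * (if x == y then 1 else 0) := by
        conv_lhs => rw [← hsplit]
        simp only [List.count_append, List.count_cons, List.count_nil]
        by_cases hxy : x = y
        · simp [hxy]; omega
        · simp [hxy]
      rw [hcount]
      by_cases hxy : (x == y) = true <;> simp [hxy]
    · -- push
      rw [pvOddStep, if_neg hc]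
      have hxnot : x ∉ out := by
        intro hx
        obtain ⟨z, hz1, hz2⟩ := pv_getLast?_le out (hout.imp le_of_lt) x hx
        have hzx : z ≤ x := hle z (List.mem_of_getLast? hz1) x List.mem_cons_self
        have : z = x := le_antisymm hzx hz2
        exact hc (this ▸ hz1)
      have hout' : (out ++ [x]).Pairwise (· < ·) := by
        rw [List.pairwise_append]
        refine ⟨hout, List.pairwise_singleton _ _, fun o ho z hz => ?_⟩
        rw [List.mem_singleton] at hz
        rw [hz]
        exact lt_of_le_of_ne (hle o ho x List.mem_cons_self) (fun h => hxnot (h ▸ ho))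
      have hle' : ∀ o ∈ out ++ [x], ∀ z ∈ xs', o ≤ z := by
        intro o ho z hz
        rcases List.mem_append.mp ho with ho | ho
        · exact hle o ho z (List.mem_cons_of_mem _ hz)
        · rw [List.mem_singleton] at ho
          exact ho ▸ hxle z hz
      obtain ⟨hpw, hmem⟩ := ih (out ++ [x]) hout' hxs' hle'
      refine ⟨hpw, fun y => ?_⟩
      rw [hmem y]
      have : (out ++ [x]) ++ xs' = out ++ x :: xs' := by simp
      rw [this]

-- the one-pass dedup scan: invariant over the fold
theorem pvUniq_fold (xs : List Int) :
    ∀ out : List Int, out.Pairwise (· < ·) → xs.Pairwise (· ≤ ·) →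
      (∀ o ∈ out, ∀ z ∈ xs, o ≤ z) →
      ((xs.foldl pvUniqStep out).Pairwise (· < ·) ∧
        ∀ y, y ∈ xs.foldl pvUniqStep out ↔ y ∈ out ++ xs) := by
  induction xs with
  | nil =>
    intro out hout _ _
    exact ⟨hout, fun y => by simp⟩
  | cons x xs' ih =>
    intro out hout hxs hle
    have hxs' : xs'.Pairwise (· ≤ ·) := (List.pairwise_cons.mp hxs).2
    have hxle : ∀ z ∈ xs', x ≤ z := (List.pairwise_cons.mp hxs).1
    simp only [List.foldl_cons]
    by_cases hc : out.getLast? = some x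
    · rw [pvUniqStep, if_pos hc]
      have hxin : x ∈ out := List.mem_of_getLast? hc
      have hle' : ∀ o ∈ out, ∀ z ∈ xs', o ≤ z := fun o ho z hz =>
        hle o ho z (List.mem_cons_of_mem _ hz)
      obtain ⟨hpw, hmem⟩ := ih out hout hxs' hle'
      refine ⟨hpw, fun y => ?_⟩
      rw [hmem y]
      simp only [List.mem_append, List.mem_cons]
      constructor
      · rintro (h | h)
        · exact .inl h
        · exact .inr (.inr h)
      · rintro (h | h | h)
        · exact .inl h
        · exact .inl (h ▸ hxin)
        · exact .inr h
    · rw [pvUniqStep, if_neg hc]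
      have hxnot : x ∉ out := by
        intro hx
        obtain ⟨z, hz1, hz2⟩ := pv_getLast?_le out (hout.imp le_of_lt) x hx
        have hzx : z ≤ x := hle z (List.mem_of_getLast? hz1) x List.mem_cons_self
        have : z = x := le_antisymm hzx hz2
        exact hc (this ▸ hz1)
      have hout' : (out ++ [x]).Pairwise (· < ·) := by
        rw [List.pairwise_append]
        refine ⟨hout, List.pairwise_singleton _ _, fun o ho z hz => ?_⟩
        rw [List.mem_singleton] at hz
        rw [hz]
        exact lt_of_le_of_ne (hle o ho x List.mem_cons_self) (fun h => hxnot (h ▸ ho))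
      have hle' : ∀ o ∈ out ++ [x], ∀ z ∈ xs', o ≤ z := by
        intro o ho z hz
        rcases List.mem_append.mp ho with ho | ho
        · exact hle o ho z (List.mem_cons_of_mem _ hz)
        · rw [List.mem_singleton] at ho
          exact ho ▸ hxle z hz
      obtain ⟨hpw, hmem⟩ := ih (out ++ [x]) hout' hxs' hle'
      refine ⟨hpw, fun y => ?_⟩
      rw [hmem y]
      have : (out ++ [x]) ++ xs' = out ++ x :: xs' := by simp
      rw [this]

theorem mem_pvUniq (l : List Int) (h : l.Pairwise (· ≤ ·)) (y : Int) : y ∈ pvUniq l ↔ y ∈ l := by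
  have := (pvUniq_fold l [] (List.Pairwise.nil) h (by simp)).2 y
  simpa [pvUniq] using this

theorem pairwise_pvUniq (l : List Int) (h : l.Pairwise (· ≤ ·)) : (pvUniq l).Pairwise (· < ·) :=
  (pvUniq_fold l [] (List.Pairwise.nil) h (by simp)).1

theorem mem_pvOddRuns (l : List Int) (h : l.Pairwise (· ≤ ·)) (y : Int) :
    y ∈ pvOddRuns l ↔ l.count y % 2 = 1 := by
  have := (pvOdd_fold l [] (List.Pairwise.nil) h (by simp)).2 y
  simpa [pvOddRuns] using this

theorem pairwise_pvOddRuns (l : List Int) (h : l.Pairwise (· ≤ ·)) :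
    (pvOddRuns l).Pairwise (· < ·) :=
  (pvOdd_fold l [] (List.Pairwise.nil) h (by simp)).1

-- the crux: A's sorted set-product equals B's parity run-scan of the sorted shifted copies
theorem pv_prod_eq (poly P : List Int) (hpoly : poly.Nodup) (hP : P.Pairwise (· < ·))
    (hmem : ∀ y, y ∈ P ↔ y ∈ poly) (M : List Int) :
    PySem.List.sorted (poly_multiply_gf2 poly M) (fun x => x)
      = pvOddRuns (PySem.List.sorted (P.flatMap (fun x => M.map (fun s => x + s))) (fun x => x)) := by
  have hsortpw : (PySem.List.sorted (P.flatMap (fun x => M.map (fun s => x + s))) (fun x => x)).Pairwise (· ≤ ·) := by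
    simpa using PySem.List.sorted_pairwise (P.flatMap (fun x => M.map (fun s => x + s))) (fun x => x)
  have hpw : (pvOddRuns (PySem.List.sorted (P.flatMap (fun x => M.map (fun s => x + s))) (fun x => x))).Pairwise (· < ·) :=
    pairwise_pvOddRuns _ hsortpw
  have hPperm : P.Perm poly := (List.perm_ext_iff_of_nodup (hP.imp ne_of_lt) hpoly).mpr hmem
  have hperm : (pvOddRuns (PySem.List.sorted (P.flatMap (fun x => M.map (fun s => x + s))) (fun x => x))).Perm
      (poly_multiply_gf2 poly M) := by
    rw [List.perm_ext_iff_of_nodup (hpw.imp ne_of_lt) (nodup_pmul poly M)]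
    intro y
    rw [mem_pvOddRuns _ hsortpw y, mem_pmul poly M y]
    rw [(PySem.List.sorted_perm (P.flatMap (fun x => M.map (fun s => x + s))) (fun x => x) false).count_eq y]
    rw [(List.Perm.flatMap_right (fun a => M.map (fun s => a + s)) hPperm).count_eq y]
  exact PySem.List.sorted_eq_of_perm_of_pairwise_lt _ _ _ hperm hpw

theorem pv_step_eq (N max_weight : Int) (poly P : List Int) (hpoly : poly.Nodup)
    (hP : P.Pairwise (· < ·)) (hmem : ∀ y, y ∈ P ↔ y ∈ poly)
    (M : List Int) (hM : M.Nodup) (st : List (List Int) × PySem.Set (List Int)) :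
    pvStepA N max_weight poly st (PySem.Set.ofList M) = pvConsider N max_weight P st M := by
  have hprod := pv_prod_eq poly P hpoly hP hmem M
  simp only [pvStepA, pvConsider]
  rw [PySem.Set.ofList_eq_self_of_nodup M hM]
  rw [hprod]
  have hlen : PySem.Set.len (poly_multiply_gf2 poly M)
      = ((pvOddRuns (PySem.List.sorted (P.flatMap (fun x => M.map (fun s => x + s))) (fun x => x))).length : Int) := by
    rw [← hprod]
    rw [(PySem.List.sorted_perm (poly_multiply_gf2 poly M) (fun x => x) false).length_eq]
    rfl
  rw [hlen]
  by_cases hc : (pvOddRuns (PySem.List.sorted (P.flatMap (fun x => M.map (fun s => x + s))) (fun x => x))) = []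
  · rw [if_neg (by simp [hc]), if_neg (by simp [hc])]
  · have hpos : 0 < ((pvOddRuns (PySem.List.sorted (P.flatMap (fun x => M.map (fun s => x + s))) (fun x => x))).length : Int) := by
      have := List.length_pos_of_ne_nil hc
      exact_mod_cast this
    by_cases hw : ((pvOddRuns (PySem.List.sorted (P.flatMap (fun x => M.map (fun s => x + s))) (fun x => x))).length : Int) ≤ max_weight
    · rw [if_pos ⟨hw, hpos⟩, if_pos ⟨hc, hw⟩]
    · rw [if_neg (by tauto), if_neg (by tauto)]

-- ===== VERDICT (by name: the statement is the Claim_ definition above) =====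
theorem find_parity_checks_spec : Claim_equal_find_parity_checks := by
  unfold Claim_equal_find_parity_checks Spec_find_parity_checks
  intro length taps N max_weight _
  simp only [find_parity_checks, find_parity_checks_alt]
  have hpoly : (PySem.Set.union (PySem.Set.ofList taps) [length]).Nodup :=
    PySem.Set.nodup_union _ _ (PySem.Set.nodup_ofList taps)
  have hsraw : (PySem.List.sorted (taps ++ [length]) (fun x => x)).Pairwise (· ≤ ·) := by
    simpa using PySem.List.sorted_pairwise (taps ++ [length]) (fun x => x)
  have hP : (pvUniq (PySem.List.sorted (taps ++ [length]) (fun x => x))).Pairwise (· < ·) :=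
    pairwise_pvUniq _ hsraw
  have hmem : ∀ y, y ∈ pvUniq (PySem.List.sorted (taps ++ [length]) (fun x => x))
      ↔ y ∈ PySem.Set.union (PySem.Set.ofList taps) [length] := by
    intro y
    rw [mem_pvUniq _ hsraw]
    rw [(PySem.List.sorted_perm (taps ++ [length]) (fun x => x) false).mem_iff]
    rw [List.mem_append, List.mem_singleton]
    rw [PySem.Set.mem_union, PySem.Set.mem_ofList]
    simp
  have hfund : PySem.List.sorted (PySem.Set.union (PySem.Set.ofList taps) [length]) (fun x => x)
      = pvUniq (PySem.List.sorted (taps ++ [length]) (fun x => x)) :=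
    PySem.List.sorted_eq_of_perm_of_pairwise_lt _ _ _
      ((List.perm_ext_iff_of_nodup (hP.imp ne_of_lt) hpoly).mpr hmem) hP
  rw [hfund]
  have hL1 : ∀ st0 : List (List Int) × PySem.Set (List Int),
      (PySem.List.pyRange 1 N).foldl
        (fun st d => pvStepA N max_weight (PySem.Set.union (PySem.Set.ofList taps) [length]) st (PySem.Set.ofList [0, d])) st0
      = (PySem.List.pyRange 1 N).foldl
        (fun st d => pvConsider N max_weight (pvUniq (PySem.List.sorted (taps ++ [length]) (fun x => x))) st [0, d]) st0 := by
    intro st0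
    apply PySem.List.foldl_congr_mem
    intro st d hd
    have hd1 : 1 ≤ d := (PySem.List.mem_pyRange_one.mp hd).1
    exact pv_step_eq N max_weight _ _ hpoly hP hmem [0, d] (by simp; omega) st
  rw [hL1]
  congr 1
  apply PySem.List.foldl_congr_mem
  intro st a ha
  have ha1 : 1 ≤ a := (PySem.List.mem_pyRange_one.mp ha).1
  apply PySem.List.foldl_congr_mem
  intro st' b hb
  have hb1 : a + 1 ≤ b := (PySem.List.mem_pyRange_one.mp hb).1
  exact pv_step_eq N max_weight _ _ hpoly hP hmem [0, a, b] (by simp; omega) st'
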